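-- pv_equiv track=rewrite | github.com/Lance-x/cube | restore2.py | jinzhi12
-- ===== SOURCE A (Python) =====
-- def jinzhi12(list: list):
-- 	# list.reverse()
-- 	if list[-1] == 11:
-- 		list1 = list[:-1]
-- 		list = jinzhi12(list1)
-- 		list.append(0)
-- 		return list
-- 	else:
-- 		list[-1] = list[-1] + 1
-- 	# list.reverse()
-- 	return list
-- ===== SOURCE B (Python) =====
-- def jinzhi12(list: list):
--     # Return-value equivalent to A (A mutates its argument, B does not).
--     n = len(list)
--     i = n - 1
--     while i >= 0 and list[i] == 11:
--         i -= 1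
--     if i < 0:
--         # every digit is 11: the incremented number gains a digit
--         return [1] + [0] * n
--     return list[:i] + [list[i] + 1] + [0] * (n - 1 - i)
-- ===== Notes on version B (the rewrite author's own statement) =====
-- stated objective: alternative
-- what changed: replaces A's recursion (which copies the prefix list[:-1] at every trailing 11) by a single right-to-left index scan that finds the first non-11 digit and assembles the result once
import Mathlib
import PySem

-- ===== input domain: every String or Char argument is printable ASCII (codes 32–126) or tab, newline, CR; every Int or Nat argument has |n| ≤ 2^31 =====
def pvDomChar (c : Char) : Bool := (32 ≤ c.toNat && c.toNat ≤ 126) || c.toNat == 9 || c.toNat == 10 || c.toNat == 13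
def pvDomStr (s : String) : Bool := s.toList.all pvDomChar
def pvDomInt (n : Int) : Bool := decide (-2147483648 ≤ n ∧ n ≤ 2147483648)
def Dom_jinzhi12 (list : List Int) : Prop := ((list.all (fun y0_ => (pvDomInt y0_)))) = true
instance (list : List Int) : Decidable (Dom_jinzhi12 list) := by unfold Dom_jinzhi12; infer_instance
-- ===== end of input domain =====

-- B replaces A's prefix-copying recursion by one right-to-left scan; equivalence is about the
-- RETURN value only (Python A mutates its argument in place, B does not).

-- ===== PORT A =====
-- A: if list[-1] == 11 recurse on list[:-1] and append 0, else set list[-1] += 1 and return it.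
def jinzhi12 (list : List Int) : List Int :=
  match h : PySem.List.pyGet? list (-1) with
  | none => []          -- Python raises IndexError here (empty list); excluded by Pre_
  | some last =>
    if last = 11 then
      jinzhi12 list.dropLast ++ [0]     -- list[:-1] is dropLast; .append(0)
    else
      list.dropLast ++ [last + 1]       -- list[-1] = list[-1] + 1
termination_by list.length
decreasing_by
  have hne : list ≠ [] := by
    intro he; subst he; simp [PySem.List.pyGet?, PySem.List.pyIdx?] at h
  have : 0 < list.length := List.length_pos_iff.mpr hne
  simp [List.length_dropLast]; omega

-- ===== PORT B =====
-- B's while loop: decrement i while i >= 0 and list[i] == 11 (list[i] with 0 ≤ i < len is exact as pyGet?).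
def jinzhi12Find (list : List Int) (i : Int) : Int :=
  if 0 ≤ i ∧ PySem.List.pyGet? list i = some 11 then jinzhi12Find list (i - 1) else i
termination_by (i + 1).toNat
decreasing_by omega

def jinzhi12_alt (list : List Int) : List Int :=
  let n : Int := list.length
  let i := jinzhi12Find list (n - 1)
  if i < 0 then
    1 :: List.replicate list.length 0                  -- [1] + [0] * n
  else
    -- list[:i] + [list[i] + 1] + [0] * (n - 1 - i); list[i] is in range here, default unused
    PySem.List.slice list none (some i)
      ++ (PySem.List.pyGetD list i 0 + 1) :: List.replicate (n - 1 - i).toNat 0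

-- ===== PRECONDITION & SPEC =====
-- Pre_ excludes exactly the inputs where Python A raises IndexError: lists all of whose
-- elements are 11 (including the empty list).
def Pre_jinzhi12 (list : List Int) : Prop := ∃ x ∈ list, x ≠ 11
instance (list : List Int) : Decidable (Pre_jinzhi12 list) := by unfold Pre_jinzhi12; infer_instance
def pvWitness_jinzhi12 : List Int := [3, 11]

def Spec_jinzhi12 (list : List Int) (out : List Int) : Prop := out = jinzhi12_alt list
instance (list : List Int) (out : List Int) : Decidable (Spec_jinzhi12 list out) := by unfold Spec_jinzhi12; infer_instance

-- ===== CLAIM (what is proved, stated in full; the proofs are below) =====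
def Claim_equal_jinzhi12 : Prop := ∀ (list : List Int), Dom_jinzhi12 list → Pre_jinzhi12 list → Spec_jinzhi12 list (jinzhi12 list)

-- ===== LEMMAS AND PROOFS =====

-- pyGet? at a nonnegative index below the prefix length ignores an appended element
lemma pyGet?_append_left (xs : List Int) (a : Int) (i : Int) (h0 : 0 ≤ i)
    (h : i < (xs.length : Int)) :
    PySem.List.pyGet? (xs ++ [a]) i = PySem.List.pyGet? xs i := by
  simp [PySem.List.pyGet?_of_nonneg, h0,
    List.getElem?_append_left (show i.toNat < xs.length by omega)]

-- the scan ignores an appended element while the start index stays inside the prefix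
lemma find_append (xs : List Int) (a : Int) (i : Int) (h : i < (xs.length : Int)) :
    jinzhi12Find (xs ++ [a]) i = jinzhi12Find xs i := by
  conv_lhs => rw [jinzhi12Find]
  conv_rhs => rw [jinzhi12Find]
  by_cases hc : 0 ≤ i ∧ PySem.List.pyGet? xs i = some 11
  · rw [if_pos ⟨hc.1, by rw [pyGet?_append_left xs a i hc.1 h]; exact hc.2⟩, if_pos hc]
    exact find_append xs a (i - 1) (by omega)
  · rw [if_neg, if_neg hc]
    intro ⟨h0, h11⟩
    exact hc ⟨h0, by rw [← pyGet?_append_left xs a i h0 h]; exact h11⟩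
termination_by (i + 1).toNat
decreasing_by omega

-- result of the scan is at most the start index
lemma find_le (xs : List Int) (i : Int) : jinzhi12Find xs i ≤ i := by
  rw [jinzhi12Find]
  split
  · have := find_le xs (i - 1); omega
  · exact le_refl i
termination_by (i + 1).toNat
decreasing_by omega

-- the scan stops at a non-11 entry or below 0
lemma find_stop (xs : List Int) (i : Int) :
    jinzhi12Find xs i < 0 ∨ PySem.List.pyGet? xs (jinzhi12Find xs i) ≠ some 11 := by
  rw [jinzhi12Find]
  split
  · exact find_stop xs (i - 1)
  · rename_i hc
    by_cases h0 : 0 ≤ i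
    · right; intro h11; exact hc ⟨h0, h11⟩
    · left; omega
termination_by (i + 1).toNat
decreasing_by omega

-- if some position k ≤ i holds a non-11 value, the scan stops at a nonnegative index
lemma find_nonneg (xs : List Int) (i k : Int) (hk0 : 0 ≤ k) (hki : k ≤ i)
    (hworth : PySem.List.pyGet? xs k ≠ some 11) : 0 ≤ jinzhi12Find xs i := by
  rw [jinzhi12Find]
  split
  · rename_i hc
    have hki' : k ≤ i - 1 := by
      rcases eq_or_lt_of_le hki with rfl | h
      · exact absurd hc.2 hworth
      · omega
    exact find_nonneg xs (i - 1) k hk0 hki' hworth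
  · omega
termination_by (i + 1).toNat
decreasing_by omega

-- B agrees with B-on-the-prefix followed by a 0 when a trailing 11 is stripped
lemma alt_strip (xs : List Int) (hpre : Pre_jinzhi12 xs) :
    jinzhi12_alt (xs ++ [11]) = jinzhi12_alt xs ++ [0] := by
  obtain ⟨x, hx, hne⟩ := hpre
  obtain ⟨k, hk, hxk⟩ := List.getElem_of_mem hx
  have hklt : (k : Int) ≤ (xs.length : Int) - 1 := by omega
  have hget : PySem.List.pyGet? xs (k : Int) ≠ some 11 := by
    rw [PySem.List.pyGet?_ofNat _ _ hk]
    simp [hxk, hne]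
  set j := jinzhi12Find xs ((xs.length : Int) - 1) with hj
  have hj0 : 0 ≤ j := find_nonneg xs _ k (by omega) hklt hget
  have hjle : j ≤ (xs.length : Int) - 1 := find_le xs _
  have hlen : 0 < xs.length := List.length_pos_of_mem hx
  -- the scan over xs ++ [11] first eats the 11 then agrees with the scan over xs
  have hfind : jinzhi12Find (xs ++ [11]) (((xs ++ [11]).length : Int) - 1) = j := by
    conv_lhs => rw [jinzhi12Find]
    rw [if_pos]
    · have : ((xs ++ [11]).length : Int) - 1 - 1 = (xs.length : Int) - 1 := by
        simp [List.length_append]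
      rw [this, find_append xs 11 _ (by omega)]
    · constructor
      · simp
      · have : ((xs ++ [11]).length : Int) - 1 = (xs.length : Int) := by simp
        rw [this]
        exact PySem.List.pyGet?_append_length (pre := xs) (y := 11) (ys := [])
  unfold jinzhi12_alt
  simp only [← hj, hfind]
  rw [if_neg (by omega), if_neg (by omega)]
  have hslice : PySem.List.slice (xs ++ [11]) none (some j) = PySem.List.slice xs none (some j) := by
    rw [PySem.List.slice_to _ hj0, PySem.List.slice_to _ hj0,
      List.take_append_of_le_length (by omega)]
  have hgetD : PySem.List.pyGetD (xs ++ [11]) j 0 = PySem.List.pyGetD xs j 0 := by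
    rw [PySem.List.pyGetD_eq_getElem _ _ hj0 (by simp [List.length_append]; omega),
      PySem.List.pyGetD_eq_getElem _ _ hj0 (by omega),
      List.getElem_append_left (by omega)]
  have hrep : (((xs ++ [11]).length : Int) - 1 - j).toNat
      = ((xs.length : Int) - 1 - j).toNat + 1 := by simp; omega
  rw [hslice, hgetD, hrep, List.replicate_succ']
  simp

lemma main (xs : List Int) (hpre : Pre_jinzhi12 xs) : jinzhi12 xs = jinzhi12_alt xs := by
  induction xs using List.reverseRecOn with
  | nil => obtain ⟨x, hx, _⟩ := hpre; cases hx
  | append_singleton xs a ih =>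
    rw [jinzhi12]
    rw [PySem.List.pyGet?_neg_one_append_singleton]
    show (if a = 11 then jinzhi12 (xs ++ [a]).dropLast ++ [0]
        else (xs ++ [a]).dropLast ++ [a + 1]) = jinzhi12_alt (xs ++ [a])
    by_cases ha : a = 11
    · subst ha
      rw [if_pos rfl, List.dropLast_concat]
      have hprex : Pre_jinzhi12 xs := by
        obtain ⟨x, hx, hne⟩ := hpre
        rcases List.mem_append.mp hx with h | h
        · exact ⟨x, h, hne⟩
        · simp at h; exact absurd h hne
      rw [ih hprex, alt_strip xs hprex]
    · rw [if_neg ha, List.dropLast_concat]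
      -- B: the scan stops immediately at the appended non-11 digit
      have hfind : jinzhi12Find (xs ++ [a]) (((xs ++ [a]).length : Int) - 1)
          = (xs.length : Int) := by
        have hlen : ((xs ++ [a]).length : Int) - 1 = (xs.length : Int) := by simp
        rw [hlen, jinzhi12Find, if_neg]
        intro ⟨_, h11⟩
        rw [PySem.List.pyGet?_append_length (pre := xs) (y := a) (ys := [])] at h11
        exact ha (by injection h11)
      unfold jinzhi12_alt
      simp only [hfind]
      rw [if_neg (by omega)]
      have hslice : PySem.List.slice (xs ++ [a]) none (some (xs.length : Int)) = xs := by
        rw [PySem.List.slice_to_natCast, List.take_left]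
      have hgetD : PySem.List.pyGetD (xs ++ [a]) (xs.length : Int) 0 = a := by
        have h1 : (xs.length : Int) < ((xs ++ [a]).length : Int) := by simp
        rw [PySem.List.pyGetD_eq_getElem (xs ++ [a]) 0 (by omega) h1]
        simp
      have hrep : (((xs ++ [a]).length : Int) - 1 - (xs.length : Int)).toNat = 0 := by
        simp
      rw [hslice, hgetD, hrep]
      simp

-- ===== VERDICT =====
theorem jinzhi12_spec : Claim_equal_jinzhi12 := by
  intro l _ hpre
  unfold Spec_jinzhi12
  exact main l hpre
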